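-- pv_equiv track=rewrite | github.com/Koitz940/AoC-2023 | day 9.py | part2
-- ===== SOURCE A (Python) =====
-- def part2(line):
--     previous = line[0]
--     symbol = 1
--     nextline = [line[i + 1] - line[i] for i in range(len(line) - 1)]
--     for x in range(len(line)-1):
--         if max(nextline) == 0 and min(nextline) == 0:
--             break
--         else:
--             previous += nextline[0] * (-1)**symbol
--             nextline = [nextline[i + 1] - nextline[i] for i in range(len(nextline) - 1)]
--             symbol += 1
--     return previous
-- ===== SOURCE B (Python) =====
-- def part2(line):
--     n = len(line)
--     total = 0
--     c = n      # C(n, 1)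
--     sign = 1
--     for j, a in enumerate(line):
--         total += sign * c * a
--         c = c * (n - j - 1) // (j + 2)   # exact: C(n, j+2)
--         sign = -sign
--     return total
-- ===== Notes on version B (the rewrite author's own statement) =====
-- stated objective: faster
-- what changed: Replaces the quadratic loop of iterated difference rows with a single O(n) pass summing (-1)^j * C(n, j+1) * line[j], the closed-form (hockey-stick) alternating binomial sum for backward extrapolation.
import Mathlib
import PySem

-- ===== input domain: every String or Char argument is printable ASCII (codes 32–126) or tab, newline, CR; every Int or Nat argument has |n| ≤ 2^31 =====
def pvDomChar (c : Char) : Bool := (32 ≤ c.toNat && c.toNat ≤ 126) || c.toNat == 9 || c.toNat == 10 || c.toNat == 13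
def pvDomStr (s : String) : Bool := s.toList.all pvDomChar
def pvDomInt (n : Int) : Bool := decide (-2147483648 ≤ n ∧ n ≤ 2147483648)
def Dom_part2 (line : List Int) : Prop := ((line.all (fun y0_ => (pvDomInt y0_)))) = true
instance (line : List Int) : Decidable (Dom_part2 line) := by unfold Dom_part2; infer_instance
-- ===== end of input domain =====

-- B replaces A's quadratic iterated-difference rows by one O(n) pass over the
-- closed-form alternating binomial sum; equivalence of return values is proved on Pre_ (nonempty input).

-- ===== PORT A =====
-- [line[i+1] - line[i] for i in range(len(line) - 1)]; every index i, i+1 is in range, so pyGetD's default 0 is never used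
def part2_diffs (l : List Int) : List Int :=
  (PySem.List.pyRange 0 ((l.length : Int) - 1) 1).map
    (fun i => PySem.List.pyGetD l (i + 1) 0 - PySem.List.pyGetD l i 0)

-- the for-x loop; counter = len(line)-1; max()/min() on the (always nonempty) row, break when both are 0
def part2_loop : Nat → Int → Nat → List Int → Int
  | 0, previous, _, _ => previous
  | fuel + 1, previous, symbol, nextline =>
    if PySem.List.max? nextline (fun y => y) = some 0 ∧
       PySem.List.min? nextline (fun y => y) = some 0 then
      previous
    else
      part2_loop fuel (previous + PySem.List.pyGetD nextline 0 0 * (-1) ^ symbol)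
        (symbol + 1) (part2_diffs nextline)

def part2 (line : List Int) : Int :=
  -- line[0] raises IndexError on []; Pre_part2 excludes the empty list, so the default is never used
  part2_loop (line.length - 1) (PySem.List.pyGetD line 0 0) 1 (part2_diffs line)

-- ===== PORT B =====
-- single fold over enumerate(line); state = (total, c, sign) exactly as in Source B
def part2_alt (line : List Int) : Int :=
  let n : Int := line.length
  ((PySem.List.enumerate line 0).foldl
    (fun (st : Int × Int × Int) (ja : Int × Int) =>
      (st.1 + st.2.2 * st.2.1 * ja.2,
       PySem.Int.floordiv (st.2.1 * (n - ja.1 - 1)) (ja.1 + 2),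
       -st.2.2))
    (0, n, 1)).1

-- ===== PRECONDITION & SPEC =====
-- Pre_ excludes only the empty list, on which A raises IndexError (line[0])
def Pre_part2 (line : List Int) : Prop := line ≠ []
instance (line : List Int) : Decidable (Pre_part2 line) := by unfold Pre_part2; infer_instance
def pvWitness_part2 : List Int := ([0, 3, 6, 9, 12, 15] : List Int)

def Spec_part2 (line : List Int) (out : Int) : Prop := out = part2_alt line
instance (line : List Int) (out : Int) : Decidable (Spec_part2 line out) := by unfold Spec_part2; infer_instance

-- ===== CLAIM (what is proved, stated in full; the proofs are below) =====
def Claim_equal_part2 : Prop := ∀ (line : List Int), Dom_part2 line → Pre_part2 line → Spec_part2 line (part2 line)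

-- ===== LEMMAS AND PROOFS =====

-- clean structural form of one difference row
def dz : List Int → List Int
  | a :: b :: t => (b - a) :: dz (b :: t)
  | _ => []

theorem length_dz : ∀ (l : List Int), (dz l).length = l.length - 1
  | [] => rfl
  | [_] => rfl
  | _ :: b :: t => by simp [dz, length_dz (b :: t)]

-- A's value as a structural recursion: head minus the extrapolation of the difference row
def F : List Int → Int
  | [] => 0
  | a :: t => a - F (dz (a :: t))
termination_by l => l.length
decreasing_by simp [length_dz]

-- B's value: the alternating binomial sum Σ (-1)^j C(n, j+1) l[j], indexed from j
def G (n : Nat) : Nat → List Int → Int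
  | _, [] => 0
  | j, a :: t => (-1 : Int) ^ j * (n.choose (j + 1)) * a + G n (j + 1) t

theorem getElem_dz : ∀ (l : List Int) (i : Nat) (h : i + 1 < l.length),
    (dz l)[i]'(by rw [length_dz]; omega) = l[i + 1] - l[i]
  | _ :: b :: t, 0, _ => rfl
  | _ :: b :: t, i + 1, h => by
    simpa [dz] using getElem_dz (b :: t) i (by simpa using h)

theorem part2_diffs_eq_dz (l : List Int) : part2_diffs l = dz l := by
  apply List.ext_getElem
  · simp [part2_diffs, PySem.List.length_pyRange_one, length_dz]
  · intro i h1 h2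
    have hl : i + 1 < l.length := by
      simp [part2_diffs, PySem.List.length_pyRange_one] at h1; omega
    rw [getElem_dz l i hl]
    simp only [part2_diffs, List.getElem_map, PySem.List.getElem_pyRange_one, zero_add]
    rw [show ((i : Int) + 1) = ((i + 1 : Nat) : Int) from by push_cast; ring]
    rw [PySem.List.pyGetD_natCast, PySem.List.pyGetD_natCast,
      List.getD_eq_getElem l 0 (by omega), List.getD_eq_getElem l 0 (by omega)]

theorem dz_zero : ∀ (l : List Int), (∀ x ∈ l, x = 0) → ∀ x ∈ dz l, x = 0
  | [], _ => by simp [dz]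
  | [_], _ => by simp [dz]
  | a :: b :: t, h => by
    intro x hx
    rcases List.mem_cons.mp hx with h1 | h2
    · have ha := h a (by simp); have hb := h b (by simp)
      omega
    · exact dz_zero (b :: t) (fun y hy => h y (List.mem_cons_of_mem a hy)) x h2

theorem F_zero : ∀ (l : List Int), (∀ x ∈ l, x = 0) → F l = 0
  | [], _ => by rw [F]
  | a :: t, h => by
    rw [F]
    have := F_zero (dz (a :: t)) (dz_zero _ h)
    have ha := h a (by simp)
    omega
termination_by l => l.length
decreasing_by simp [length_dz]

theorem loop_eq : ∀ (m : Nat) (p : Int) (s : Nat) (d : List Int), d.length ≤ m →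
    part2_loop m p s d = p + (-1 : Int) ^ s * F d
  | 0, p, s, d, h => by
    have : d = [] := List.eq_nil_of_length_eq_zero (by omega)
    subst this; simp [part2_loop, F]
  | m + 1, p, s, d, h => by
    rw [part2_loop]
    split
    · -- max and min are both 0: the row is all zeros, so F d = 0
      next hc =>
      have hz : ∀ x ∈ d, x = 0 := by
        intro x hx
        have h1 := PySem.List.max?_isMax hc.1 x hx
        have h2 := PySem.List.min?_isMin hc.2 x hx
        omega
      rw [F_zero d hz]; ring
    · cases d with
      | nil =>
        rw [loop_eq m _ (s + 1) (part2_diffs []) (by simp [part2_diffs_eq_dz, length_dz])]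
        simp [part2_diffs_eq_dz, dz, F, PySem.List.pyGetD_zero]
      | cons a t =>
        rw [part2_diffs_eq_dz,
          loop_eq m _ (s + 1) (dz (a :: t)) (by rw [length_dz]; simp at h ⊢; omega)]
        rw [show F (a :: t) = a - F (dz (a :: t)) from by rw [F]]
        simp [PySem.List.pyGetD_zero, pow_succ]
        ring

theorem A_eq_F (l : List Int) (h : l ≠ []) : part2 l = F l := by
  obtain ⟨a, t, rfl⟩ := List.exists_cons_of_ne_nil h
  rw [part2, part2_diffs_eq_dz,
    loop_eq (List.length (a :: t) - 1) _ 1 (dz (a :: t)) (by rw [length_dz])]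
  rw [show F (a :: t) = a - F (dz (a :: t)) from by rw [F]]
  simp [PySem.List.pyGetD_zero]
  ring

-- the telescoping/Pascal step: one difference row under the binomial sum
theorem K : ∀ (t : List Int) (a : Int) (m j : Nat), m ≤ j + t.length →
    G m j (dz (a :: t)) = -((-1 : Int) ^ j * (m.choose (j + 1)) * a) - G (m + 1) (j + 1) t
  | [], a, m, j, h => by
    have : m.choose (j + 1) = 0 := Nat.choose_eq_zero_of_lt (by simpa using h)
    simp [dz, G, this]
  | b :: t', a, m, j, h => by
    have ih := K t' b m (j + 1) (by simp at h ⊢; omega)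
    show G m j ((b - a) :: dz (b :: t')) = _
    rw [G, ih, G]
    have pascal : ((m + 1).choose (j + 2) : Int) = (m.choose (j + 1) : Int) + (m.choose (j + 2) : Int) := by
      exact_mod_cast Nat.choose_succ_succ (m) (j + 1)
    rw [pascal]
    ring

theorem F_eq_G : ∀ (l : List Int), F l = G l.length 0 l
  | [] => by rw [F]; rfl
  | a :: t => by
    rw [F]
    have hlen : (dz (a :: t)).length = t.length := by rw [length_dz]; simp
    have ih := F_eq_G (dz (a :: t))
    rw [hlen] at ih
    rw [ih, K t a t.length 0 (by omega)]
    rw [show G (a :: t).length 0 (a :: t)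
        = (-1 : Int) ^ 0 * ((a :: t).length.choose 1) * a + G (a :: t).length 1 t from by rw [G]]
    simp [Nat.choose_one_right]
    ring
termination_by l => l.length
decreasing_by simp [length_dz]

-- loop invariant of B's fold: c = C(n, j+1), sign = (-1)^j
theorem B_fold : ∀ (N : Nat) (rest : List Int) (j : Nat) (total : Int), j + rest.length ≤ N →
    ((PySem.List.enumerate rest (j : Int)).foldl
      (fun (st : Int × Int × Int) (ja : Int × Int) =>
        (st.1 + st.2.2 * st.2.1 * ja.2,
         PySem.Int.floordiv (st.2.1 * ((N : Int) - ja.1 - 1)) (ja.1 + 2),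
         -st.2.2))
      (total, (N.choose (j + 1) : Int), (-1 : Int) ^ j)).1 = total + G N j rest
  | N, [], j, total, _ => by simp [PySem.List.enumerate_nil, G]
  | N, a :: t, j, total, h => by
    rw [PySem.List.enumerate_cons, List.foldl_cons]
    have hj : j + 1 ≤ N := by simp at h; omega
    have hc : PySem.Int.floordiv ((N.choose (j + 1) : Int) * ((N : Int) - (j : Int) - 1)) ((j : Int) + 2)
        = (N.choose (j + 2) : Int) := by
      have hcast : ((N : Int) - (j : Int) - 1) = ((N - (j + 1) : Nat) : Int) := by omega
      have hmul : N.choose (j + 1) * (N - (j + 1)) = N.choose (j + 2) * (j + 2) :=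
        (Nat.choose_succ_right_eq N (j + 1)).symm
      rw [hcast, show ((j : Int) + 2) = ((j + 2 : Nat) : Int) from by omega]
      rw [show ((N.choose (j + 1) : Int) * ((N - (j + 1) : Nat) : Int))
          = ((N.choose (j + 1) * (N - (j + 1)) : Nat) : Int) from by push_cast; ring]
      rw [PySem.Int.floordiv_natCast, hmul, Nat.mul_div_cancel _ (by omega)]
    have ih := B_fold N t (j + 1) (total + (-1 : Int) ^ j * (N.choose (j + 1) : Int) * a)
      (by simp at h ⊢; omega)
    have e1 : ((j : Int) + 1) = ((j + 1 : Nat) : Int) := by push_cast; ring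
    have e2 : N.choose (j + 1 + 1) = N.choose (j + 2) := by norm_num
    have e3 : (-1 : Int) ^ (j + 1) = -((-1 : Int) ^ j) := by ring
    rw [e2, e3] at ih
    simp only [e1, hc]
    rw [ih, G]
    ring

theorem B_eq_G (l : List Int) : part2_alt l = G l.length 0 l := by
  have h := B_fold l.length l 0 0 (by omega)
  simp only [Nat.cast_zero, pow_zero] at h
  simpa [part2_alt] using h

-- ===== VERDICT (by name: the statement is the Claim_ definition above) =====
theorem part2_spec : Claim_equal_part2 := by
  intro line _ hpre
  show part2 line = part2_alt line
  rw [A_eq_F line hpre, F_eq_G, B_eq_G]
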